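-- pv_equiv track=rewrite | github.com/learnore/helloshen | z_huawei_od/24_od/100/55_逻辑.py | solution
-- ===== SOURCE A (Python) =====
-- def solution(n, gems, value):
--     """ 返回可以购买连续的宝石最大数量 """
--     result = 0
--     for i in range(len(gems)):
--         temp_value = 0
--         temp_res = 0
--
--         while temp_value < value and i < len(gems):
--             temp_value += gems[i]
--             temp_res += 1
--             i += 1
--
--         if temp_value > value:        # 则最后一次不能加入，买不了，钱不够
--             temp_res -= 1
--
--         result = max(result, temp_res)
--
--     return result
-- ===== SOURCE B (Python) =====
-- def solution(n, gems, value):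
--     """ 返回可以购买连续的宝石最大数量 """
--     m = len(gems)
--     # prefix sums: P[k] = gems[0] + ... + gems[k-1]
--     P = [0]
--     for g in gems:
--         P.append(P[-1] + g)
--     best = 0
--     # Scan starts right-to-left. st keeps the left-to-right maxima ("records")
--     # of P over the suffix [i..m]: positions increasing and P strictly
--     # increasing along st; the first j >= i with P[j] >= P[i] + value is
--     # always such a record, so it can be found by binary search in st.
--     st = []
--     for i in range(m, -1, -1):
--         while st and P[st[-1]] <= P[i]:
--             st.pop()
--         st.append(i)
--         t = P[i] + value
--         # binary search: lo = length of the prefix of st with P >= t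
--         lo, hi = 0, len(st)
--         while lo < hi:
--             mid = (lo + hi) // 2
--             if P[st[mid]] >= t:
--                 lo = mid + 1
--             else:
--                 hi = mid
--         if lo == 0:
--             cnt = m - i          # the whole suffix stays below value
--         else:
--             j = st[lo - 1]       # first position >= i whose prefix sum reaches t
--             cnt = (j - i) - (1 if P[j] > t else 0)
--         best = max(best, cnt)
--     return best
-- ===== Notes on version B (the rewrite author's own statement) =====
-- stated objective: alternative
-- what changed: A rescans gems from every start index (nested loops); B computes prefix sums once and scans starts right-to-left, maintaining a monotonic stack of suffix record positions in which the first prefix-sum reaching each start's budget is found by binary search (intended as faster, O(n log n) vs O(n^2); a timing run read 6.52x at the largest size both finished but did not confirm it at every size).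
import Mathlib
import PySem

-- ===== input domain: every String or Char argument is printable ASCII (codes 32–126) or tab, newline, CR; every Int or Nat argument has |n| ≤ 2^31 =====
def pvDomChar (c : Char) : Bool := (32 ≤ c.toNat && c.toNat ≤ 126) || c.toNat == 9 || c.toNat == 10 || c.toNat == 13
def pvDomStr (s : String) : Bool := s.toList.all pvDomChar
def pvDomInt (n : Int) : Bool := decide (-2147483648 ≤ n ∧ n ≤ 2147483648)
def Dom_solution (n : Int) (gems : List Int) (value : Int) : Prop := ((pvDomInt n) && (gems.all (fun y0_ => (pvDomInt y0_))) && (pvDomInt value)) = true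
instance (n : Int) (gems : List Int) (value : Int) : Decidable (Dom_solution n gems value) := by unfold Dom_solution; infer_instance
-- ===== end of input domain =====

-- B replaces A's per-start inner rescan by prefix sums plus a monotonic stack of suffix
-- record positions queried by binary search; same return value is proved for all inputs.

-- ===== PORT A =====
-- inner while loop of A: `while temp_value < value and i < len(gems): ...`, followed by
-- the overshoot adjustment `if temp_value > value: temp_res -= 1`
def innerA (gems : List Int) (value : Int) (i : Nat) (tv tr : Int) : Int :=
  if h : tv < value ∧ i < gems.length then
    innerA gems value (i + 1) (tv + gems[i]'h.2) (tr + 1)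
  else if value < tv then tr - 1 else tr
termination_by gems.length - i

-- for i in range(len(gems)): ... result = max(result, temp_res)
def solution (n : Int) (gems : List Int) (value : Int) : Int :=
  (List.range gems.length).foldl (fun result i => max result (innerA gems value i 0 0)) 0

-- ===== PORT B =====
-- P = [0]; for g in gems: P.append(P[-1] + g)
def prefB (gems : List Int) : List Int :=
  gems.foldl (fun P g => P ++ [P.getLastD 0 + g]) [0]

-- while st and P[st[-1]] <= P[i]: st.pop()
def popWhileB (P : List Int) (pi : Int) (st : List Nat) : List Nat :=
  if h : st ≠ [] ∧ P.getD (st.getLastD 0) 0 ≤ pi then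
    popWhileB P pi st.dropLast
  else st
termination_by st.length
decreasing_by
  have : st.dropLast.length = st.length - 1 := List.length_dropLast
  have hne : st.length ≠ 0 := fun hl => h.1 (List.eq_nil_of_length_eq_zero hl)
  omega

-- lo, hi = 0, len(st); while lo < hi: ... (the binary search loop)
def bsearchB (P : List Int) (st : List Nat) (t : Int) (lo hi : Nat) : Nat :=
  if h : lo < hi then
    let mid := (lo + hi) / 2
    if t ≤ P.getD (st.getD mid 0) 0 then bsearchB P st t (mid + 1) hi
    else bsearchB P st t lo mid
  else lo
termination_by hi - lo
decreasing_by all_goals omega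

-- body of `for i in range(m, -1, -1)`
def stepB (value : Int) (P : List Int) (m : Nat) (s : List Nat × Int) (i : Nat) : List Nat × Int :=
  let st := popWhileB P (P.getD i 0) s.1
  let st := st ++ [i]
  let t := P.getD i 0 + value
  let lo := bsearchB P st t 0 st.length
  let cnt : Int :=
    if lo = 0 then (m : Int) - (i : Int)
    else
      let j := st.getD (lo - 1) 0
      ((j : Int) - (i : Int)) - (if t < P.getD j 0 then 1 else 0)
  (st, max s.2 cnt)

def solution_alt (n : Int) (gems : List Int) (value : Int) : Int :=
  let m := gems.length
  let P := prefB gems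
  (((List.range (m + 1)).reverse).foldl (stepB value P m) ([], 0)).2

-- ===== PRECONDITION & SPEC =====
def Spec_solution (n : Int) (gems : List Int) (value : Int) (out : Int) : Prop := out = solution_alt n gems value
instance (n : Int) (gems : List Int) (value : Int) (out : Int) : Decidable (Spec_solution n gems value out) := by unfold Spec_solution; infer_instance

-- ===== CLAIM (what is proved, stated in full; the proofs are below) =====
def Claim_equal_solution : Prop := ∀ (n : Int) (gems : List Int) (value : Int), Dom_solution n gems value → Spec_solution n gems value (solution n gems value)

-- ===== LEMMAS AND PROOFS =====

def Pf (gems : List Int) (k : Nat) : Int := ((gems.take k).sum)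

def fP (gems : List Int) (j : Nat) : Int := (prefB gems).getD j 0

def topRecs (f : Nat → Int) (i m : Nat) : List Nat :=
  if _ : i < m then i :: (topRecs f (i + 1) m).dropWhile (fun j => decide (f j ≤ f i))
  else [i]
termination_by m - i

-- prefix-sum list = table of Pf

def cntA (gems : List Int) (value : Int) (i : Nat) : Int :=
  match (List.range' i (gems.length + 1 - i)).find?
      (fun j => decide (Pf gems i + value ≤ Pf gems j)) with
  | some j => ((j : Int) - i) - (if Pf gems i + value < Pf gems j then 1 else 0)
  | none => ((gems.length : Int) - i)

theorem prefB_eq (gems : List Int) :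
    prefB gems = (List.range (gems.length + 1)).map (Pf gems) := by
  induction gems using List.reverseRecOn with
  | nil => simp [prefB, Pf]
  | append_singleton gs g ih =>
    have hstep : prefB (gs ++ [g]) = prefB gs ++ [(prefB gs).getLastD 0 + g] := by
      unfold prefB
      rw [List.foldl_append]
      rfl
    rw [hstep, ih]
    have hlast : ((List.range (gs.length + 1)).map (Pf gs)).getLastD 0 = Pf gs gs.length := by
      rw [List.range_succ, List.map_append]
      simp
    rw [hlast]
    have hlen : (gs ++ [g]).length + 1 = (gs.length + 1) + 1 := by simp
    rw [hlen]
    have hsplit : List.range (gs.length + 1 + 1) = List.range (gs.length + 1) ++ [gs.length + 1] :=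
      List.range_succ
    rw [hsplit, List.map_append]
    have hcongr : (List.range (gs.length + 1)).map (Pf (gs ++ [g]))
        = (List.range (gs.length + 1)).map (Pf gs) := by
      apply List.map_congr_left
      intro k hk
      have hk' : k ≤ gs.length := by
        have := List.mem_range.mp hk; omega
      unfold Pf
      rw [List.take_append_of_le_length hk']
    rw [hcongr]
    congr 1
    simp only [List.map_cons, List.map_nil]
    have hpf : Pf (gs ++ [g]) (gs.length + 1) = Pf gs gs.length + g := by
      unfold Pf
      rw [show gs.length + 1 = (gs ++ [g]).length by simp, List.take_length, List.take_length]
      simp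
    rw [hpf]

theorem fP_eq (gems : List Int) (k : Nat) (hk : k ≤ gems.length) : fP gems k = Pf gems k := by
  unfold fP
  rw [prefB_eq]
  rw [List.getD_eq_getElem _ _ (by simp; omega)]
  simp

-- pop loop on a reversed list = dropWhile on the original

theorem Pf_succ (gems : List Int) (i : Nat) (h : i < gems.length) :
    Pf gems (i + 1) = Pf gems i + gems[i] := by
  rw [Pf, Pf, List.sum_take_succ]

theorem popWhileB_reverse (P : List Int) (pi : Int) :
    ∀ l : List Nat, popWhileB P pi l.reverse
      = (l.dropWhile (fun j => decide (P.getD j 0 ≤ pi))).reverse := by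
  intro l
  induction l with
  | nil => unfold popWhileB; simp
  | cons a l ih =>
    rw [List.reverse_cons]
    unfold popWhileB
    by_cases hc : P.getD a 0 ≤ pi
    · rw [dif_pos ⟨by simp, by rw [List.getLastD_concat]; exact hc⟩]
      rw [List.dropLast_concat, ih, List.dropWhile_cons_of_pos (by simpa using hc)]
    · rw [dif_neg (by
        rintro ⟨-, hle⟩
        rw [List.getLastD_concat] at hle
        exact hc hle)]
      rw [List.dropWhile_cons_of_neg (by simpa using hc), List.reverse_cons]

theorem topRecs_mem (f : Nat → Int) :
    ∀ i m, i ≤ m → ∀ j ∈ topRecs f i m, i ≤ j ∧ j ≤ m := by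
  have main : ∀ k i m, m - i = k → i ≤ m → ∀ j ∈ topRecs f i m, i ≤ j ∧ j ≤ m := by
    intro k
    induction k with
    | zero =>
      intro i m hk hi j hj
      have : i = m := by omega
      subst this
      unfold topRecs at hj
      rw [dif_neg (by omega)] at hj
      simp at hj
      omega
    | succ k ih =>
      intro i m hk hi j hj
      have hlt : i < m := by omega
      unfold topRecs at hj
      rw [dif_pos hlt] at hj
      rcases List.mem_cons.mp hj with h | h
      · omega
      · have hmem : j ∈ topRecs f (i + 1) m :=
          (List.dropWhile_sublist _).subset h
        have := ih (i + 1) m (by omega) (by omega) j hmem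
        omega
  intro i m hi
  exact main (m - i) i m rfl hi

theorem topRecs_pairwise (f : Nat → Int) :
    ∀ i m, i ≤ m → (topRecs f i m).Pairwise (fun a b => a < b ∧ f a < f b) := by
  have main : ∀ k i m, m - i = k → i ≤ m →
      (topRecs f i m).Pairwise (fun a b => a < b ∧ f a < f b) := by
    intro k
    induction k with
    | zero =>
      intro i m hk hi
      have : i = m := by omega
      subst this
      unfold topRecs
      rw [dif_neg (by omega)]
      simp
    | succ k ih =>
      intro i m hk hi
      have hlt : i < m := by omega
      unfold topRecs
      rw [dif_pos hlt]
      have hTpw := ih (i + 1) m (by omega) (by omega)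
      set T := topRecs f (i + 1) m with hT
      set q : Nat → Bool := fun j => decide (f j ≤ f i) with hq
      have hDpw : (T.dropWhile q).Pairwise (fun a b => a < b ∧ f a < f b) :=
        List.Pairwise.sublist (List.dropWhile_sublist _) hTpw
      rw [List.pairwise_cons]
      refine ⟨?_, hDpw⟩
      intro j hj
      have hmemT : j ∈ T := (List.dropWhile_sublist _).subset hj
      have hij : i < j := by
        have := topRecs_mem f (i + 1) m (by omega) j hmemT
        omega
      refine ⟨hij, ?_⟩
      rcases hD : T.dropWhile q with _ | ⟨d, D'⟩
      · rw [hD] at hj; simp at hj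
      · have hdhead : q d = false := by
          have := List.head?_dropWhile_not q T
          rw [hD] at this
          simpa using this
        have hfd : f i < f d := by
          simp only [hq, decide_eq_false_iff_not, not_le] at hdhead
          exact hdhead
        rw [hD] at hj
        rcases List.mem_cons.mp hj with h | h
        · subst h; exact hfd
        · have := (List.pairwise_cons.mp (hD ▸ hDpw)).1 j h
          exact lt_trans hfd this.2
  intro i m hi
  exact main (m - i) i m rfl hi

theorem find?_congr_mem {α : Type} (l : List α) (p q : α → Bool)
    (h : ∀ x ∈ l, p x = q x) : l.find? p = l.find? q := by
  induction l with
  | nil => rfl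
  | cons a l ih =>
    rw [List.find?_cons, List.find?_cons, h a (by simp)]
    rcases hq : q a
    · exact ih (fun x hx => h x (by simp [hx]))
    · rfl

-- the first position in [i..m] whose value reaches t is found among the records

theorem topRecs_find? (f : Nat → Int) (t : Int) :
    ∀ i m, i ≤ m →
      (List.range' i (m + 1 - i)).find? (fun j => decide (t ≤ f j))
        = (topRecs f i m).find? (fun j => decide (t ≤ f j)) := by
  have main : ∀ k i m, m - i = k → i ≤ m →
      (List.range' i (m + 1 - i)).find? (fun j => decide (t ≤ f j))
        = (topRecs f i m).find? (fun j => decide (t ≤ f j)) := by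
    intro k
    induction k with
    | zero =>
      intro i m hk hi
      have : i = m := by omega
      subst this
      rw [show i + 1 - i = 1 by omega, List.range'_one]
      unfold topRecs
      rw [dif_neg (by omega)]
    | succ k ih =>
      intro i m hk hi
      have hlt : i < m := by omega
      rw [show m + 1 - i = (m - i) + 1 by omega, List.range'_succ]
      unfold topRecs
      rw [dif_pos hlt]
      rw [List.find?_cons, List.find?_cons]
      rcases hp : decide (t ≤ f i)
      · -- t > f i : dropped prefix elements (f ≤ f i < t) can never match
        have hih := ih (i + 1) m (by omega) (by omega)
        rw [show m + 1 - (i + 1) = m - i by omega] at hih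
        rw [hih]
        set T := topRecs f (i + 1) m with hT
        set q : Nat → Bool := fun j => decide (f j ≤ f i) with hqd
        have hsplit : T.takeWhile q ++ T.dropWhile q = T := List.takeWhile_append_dropWhile
        conv_lhs => rw [← hsplit]
        rw [List.find?_append]
        have hnone : (T.takeWhile q).find? (fun j => decide (t ≤ f j)) = none := by
          rw [List.find?_eq_none]
          intro x hx
          have hqx := List.mem_takeWhile_imp hx
          simp only [hqd, decide_eq_true_eq] at hqx
          simp only [decide_eq_false_iff_not, decide_eq_true_eq, not_le] at hp ⊢
          omega
        rw [hnone, Option.none_or]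
      · rfl
  intro i m hi
  exact main (m - i) i m rfl hi

theorem bsearchB_correct (P : List Int) (st : List Nat) (t : Int) (K : Nat)
    (Htrue : ∀ idx, idx < K → t ≤ P.getD (st.getD idx 0) 0)
    (Hfalse : ∀ idx, K ≤ idx → idx < st.length → ¬ t ≤ P.getD (st.getD idx 0) 0) :
    ∀ fuel lo hi, hi - lo ≤ fuel → lo ≤ K → K ≤ hi → hi ≤ st.length →
      bsearchB P st t lo hi = K := by
  intro fuel
  induction fuel with
  | zero =>
    intro lo hi hf h1 h2 h3
    unfold bsearchB
    rw [dif_neg (by omega)]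
    omega
  | succ fuel ih =>
    intro lo hi hf h1 h2 h3
    unfold bsearchB
    by_cases hlh : lo < hi
    · rw [dif_pos hlh]
      simp only []
      by_cases hmid : t ≤ P.getD (st.getD ((lo + hi) / 2) 0) 0
      · rw [if_pos hmid]
        have hKgt : (lo + hi) / 2 < K := by
          by_contra hcon
          exact Hfalse _ (by omega) (by omega) hmid
        exact ih _ _ (by omega) (by omega) h2 h3
      · rw [if_neg hmid]
        have hKle : K ≤ (lo + hi) / 2 := by
          by_contra hcon
          exact hmid (Htrue _ (by omega))
        exact ih _ _ (by omega) h1 hKle (by omega)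
    · rw [dif_neg hlh]
      omega

-- foldl-max distributes over max

theorem foldl_max_absorb (g : Nat → Int) :
    ∀ (l : List Nat) (a c : Int),
      max (l.foldl (fun b j => max b (g j)) a) c = l.foldl (fun b j => max b (g j)) (max a c) := by
  intro l
  induction l with
  | nil => intro a c; rfl
  | cons x l ih =>
    intro a c
    simp only [List.foldl_cons]
    rw [ih (max a (g x)) c]
    congr 1
    rw [max_comm a c] at *
    rw [max_assoc, max_comm (g x) c, ← max_assoc]
    rw [max_comm c a]

theorem foldl_max_reverse (g : Nat → Int) :
    ∀ (l : List Nat) (a : Int),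
      (l.reverse).foldl (fun b j => max b (g j)) a = l.foldl (fun b j => max b (g j)) a := by
  intro l
  induction l with
  | nil => intro a; rfl
  | cons x l ih =>
    intro a
    rw [List.reverse_cons, List.foldl_append, ih]
    simp only [List.foldl_cons, List.foldl_nil]
    exact foldl_max_absorb g l a (g x)

theorem le_foldl_max (g : Nat → Int) :
    ∀ (l : List Nat) (a : Int), a ≤ l.foldl (fun b j => max b (g j)) a := by
  intro l
  induction l with
  | nil => intro a; exact le_refl a
  | cons x l ih =>
    intro a
    simp only [List.foldl_cons]
    exact le_trans (le_max_left a (g x)) (ih (max a (g x)))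

theorem stepB_core (gems : List Int) (value : Int) (i : Nat) (hi : i ≤ gems.length)
    (b : Int) (st0 : List Nat)
    (hst : popWhileB (prefB gems) ((prefB gems).getD i 0) st0 ++ [i]
      = (topRecs (fP gems) i gems.length).reverse) :
    stepB value (prefB gems) gems.length (st0, b) i
      = ((topRecs (fP gems) i gems.length).reverse, max b (cntA gems value i)) := by
  set m := gems.length with hm
  set P := prefB gems with hP
  set R := topRecs (fP gems) i m with hR
  set t : Int := P.getD i 0 + value with ht
  set p : Nat → Bool := fun j => decide (t ≤ fP gems j) with hp
  set np : Nat → Bool := fun j => ! p j with hnp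
  set R₁ := R.takeWhile np with hR1d
  set R₂ := R.dropWhile np with hR2d
  have hsplit : R₁ ++ R₂ = R := List.takeWhile_append_dropWhile
  have hpw : R.Pairwise (fun a b => a < b ∧ fP gems a < fP gems b) :=
    topRecs_pairwise (fP gems) i m hi
  have hmem : ∀ j ∈ R, i ≤ j ∧ j ≤ m := topRecs_mem (fP gems) i m hi
  have hR1f : ∀ x ∈ R₁, ¬ t ≤ fP gems x := by
    intro x hx
    have := List.mem_takeWhile_imp hx
    simp only [hnp, hp, Bool.not_eq_true', decide_eq_false_iff_not] at this
    exact this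
  have hR2t : ∀ x ∈ R₂, t ≤ fP gems x := by
    intro x hx
    rcases hc : R₂ with _ | ⟨d, D'⟩
    · rw [hc] at hx; simp at hx
    · have hd : t ≤ fP gems d := by
        have := List.head?_dropWhile_not np R
        rw [← hR2d, hc] at this
        simp only [List.head?_cons, hnp, hp] at this
        simpa using this
      rw [hc] at hx
      rcases List.mem_cons.mp hx with h | h
      · subst h; exact hd
      · have hpw2 : R₂.Pairwise (fun a b => a < b ∧ fP gems a < fP gems b) :=
          List.Pairwise.sublist (hR2d ▸ List.dropWhile_sublist np) hpw
        rw [hc] at hpw2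
        have := (List.pairwise_cons.mp hpw2).1 x h
        exact le_trans hd (le_of_lt this.2)
  have hrev : R.reverse = R₂.reverse ++ R₁.reverse := by
    conv_lhs => rw [← hsplit]
    rw [List.reverse_append]
  set K := R₂.length with hK
  have hlenR : R.length = R₁.length + K := by
    rw [← hsplit]; simp [hK]
  have Htrue : ∀ idx, idx < K → t ≤ P.getD (R.reverse.getD idx 0) 0 := by
    intro idx hidx
    rw [hrev, List.getD_append R₂.reverse R₁.reverse 0 idx (by simpa using hidx)]
    rw [List.getD_eq_getElem R₂.reverse 0 (by simpa using hidx)]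
    exact hR2t _ (List.mem_reverse.mp (List.getElem_mem (by simpa using hidx)))
  have Hfalse : ∀ idx, K ≤ idx → idx < R.reverse.length → ¬ t ≤ P.getD (R.reverse.getD idx 0) 0 := by
    intro idx h1 h2
    have h2' : idx < R₂.reverse.length + R₁.reverse.length := by
      rw [hrev] at h2
      simpa using h2
    rw [hrev, List.getD_append_right R₂.reverse R₁.reverse 0 idx (by simpa using h1)]
    have e2 : R₂.reverse.length = K := by simp [hK]
    have e1 : R₁.reverse.length = R₁.length := by simp
    have hlt : idx - R₂.reverse.length < R₁.reverse.length := by omega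
    rw [List.getD_eq_getElem R₁.reverse 0 hlt]
    exact hR1f _ (List.mem_reverse.mp (List.getElem_mem hlt))
  have hbs : bsearchB P R.reverse t 0 R.reverse.length = K :=
    bsearchB_correct P R.reverse t K Htrue Hfalse R.reverse.length 0 R.reverse.length
      (by omega) (by omega) (by simp; omega) (by omega)
  -- the find? in cntA equals find? p over the records
  have hpredeq : (List.range' i (m + 1 - i)).find?
      (fun j => decide (Pf gems i + value ≤ Pf gems j)) = R.find? p := by
    rw [find?_congr_mem _ _ p (by
      intro x hx
      have hxm : x ≤ m := by
        have := List.mem_range'_1.mp hx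
        omega
      simp only [hp, decide_eq_decide]
      rw [fP_eq gems x hxm]
      have hti : t = Pf gems i + value := by
        rw [ht, hP, show (prefB gems).getD i 0 = fP gems i from rfl, fP_eq gems i hi]
      rw [hti])]
    exact topRecs_find? (fP gems) t i m hi
  have hcnt : (if bsearchB P R.reverse t 0 R.reverse.length = 0 then (m : Int) - (i : Int)
      else
        ((R.reverse.getD (bsearchB P R.reverse t 0 R.reverse.length - 1) 0 : Nat) : Int) - (i : Int)
          - (if t < P.getD (R.reverse.getD (bsearchB P R.reverse t 0 R.reverse.length - 1) 0) 0
             then 1 else 0))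
      = cntA gems value i := by
    rw [hbs]
    by_cases hK0 : K = 0
    · rw [if_pos hK0]
      have hR2nil : R₂ = [] := List.length_eq_zero_iff.mp hK0
      have hfind : R.find? p = none := by
        rw [List.find?_eq_none]
        intro x hx
        have hx1 : x ∈ R₁ := by
          rw [← hsplit, hR2nil, List.append_nil] at hx
          exact hx
        simp only [hp, decide_eq_true_eq]
        exact hR1f x hx1
      unfold cntA
      rw [hpredeq, hfind]
    · rw [if_neg hK0]
      rcases hc : R₂ with _ | ⟨d, D'⟩
      · exact absurd (by rw [hK, hc]; rfl) hK0
      have hdm : d ∈ R := by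
        rw [← hsplit, hc]
        simp
      have eK : K = D'.length + 1 := by rw [hK, hc]; simp
      have hgetd : R.reverse.getD (K - 1) 0 = d := by
        rw [hrev, List.getD_append R₂.reverse R₁.reverse 0 (K - 1) (by simp [hK]; omega)]
        rw [hc, List.reverse_cons, List.getD_append_right D'.reverse [d] 0 (K - 1) (by simp; omega)]
        rw [show K - 1 - D'.reverse.length = 0 by simp; omega]
        rfl
      rw [hgetd]
      have hfind : R.find? p = some d := by
        conv_lhs => rw [← hsplit]
        rw [List.find?_append]
        have h1 : R₁.find? p = none := by
          rw [List.find?_eq_none]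
          intro x hx
          simp only [hp, decide_eq_true_eq]
          exact hR1f x hx
        rw [h1, Option.none_or, hc, List.find?_cons_of_pos (by
          simp only [hp, decide_eq_true_eq]
          exact hR2t d (by rw [hc]; simp))]
      unfold cntA
      rw [hpredeq, hfind]
      simp only []
      have hdmm : d ≤ m := (hmem d hdm).2
      have htd : t = Pf gems i + value := by
        rw [ht, hP]
        have : (prefB gems).getD i 0 = fP gems i := rfl
        rw [this, fP_eq gems i hi]
      have hfd : P.getD d 0 = Pf gems d := by
        rw [hP]
        have : (prefB gems).getD d 0 = fP gems d := rfl
        rw [this, fP_eq gems d hdmm]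
      rw [htd, hfd]
  -- now unfold stepB
  show (let st := popWhileB P (P.getD i 0) st0;
        let st := st ++ [i];
        let t := P.getD i 0 + value;
        let lo := bsearchB P st t 0 st.length;
        let cnt : Int :=
          if lo = 0 then (m : Int) - (i : Int)
          else
            let j := st.getD (lo - 1) 0
            ((j : Int) - (i : Int)) - (if t < P.getD j 0 then 1 else 0);
        (st, max b cnt)) = (R.reverse, max b (cntA gems value i))
  simp only []
  rw [hst]
  rw [← ht]
  rw [hcnt]

theorem stepB_rec (gems : List Int) (value : Int) (i : Nat) (hlt : i < gems.length) (b : Int) :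
    stepB value (prefB gems) gems.length ((topRecs (fP gems) (i + 1) gems.length).reverse, b) i
      = ((topRecs (fP gems) i gems.length).reverse, max b (cntA gems value i)) := by
  apply stepB_core gems value i (by omega) b
  rw [popWhileB_reverse, ← List.reverse_cons]
  congr 1
  conv_rhs => rw [topRecs]
  rw [dif_pos hlt]
  rfl

theorem stepB_base (gems : List Int) (value : Int) (b : Int) :
    stepB value (prefB gems) gems.length ([], b) gems.length
      = ((topRecs (fP gems) gems.length gems.length).reverse, max b (cntA gems value gems.length)) := by
  apply stepB_core gems value gems.length (by omega) b
  have h1 : popWhileB (prefB gems) ((prefB gems).getD gems.length 0) [] = [] := by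
    unfold popWhileB
    rw [dif_neg (by simp)]
  rw [h1]
  unfold topRecs
  rw [dif_neg (by omega)]
  rfl

theorem loopB (gems : List Int) (value : Int) :
    ∀ i, i ≤ gems.length →
      ((List.range' i (gems.length + 1 - i)).reverse).foldl
          (stepB value (prefB gems) gems.length) ([], 0)
        = ((topRecs (fP gems) i gems.length).reverse,
           ((List.range' i (gems.length + 1 - i)).reverse).foldl
             (fun b j => max b (cntA gems value j)) 0) := by
  have main : ∀ k i, gems.length - i = k → i ≤ gems.length →
      ((List.range' i (gems.length + 1 - i)).reverse).foldl
          (stepB value (prefB gems) gems.length) ([], 0)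
        = ((topRecs (fP gems) i gems.length).reverse,
           ((List.range' i (gems.length + 1 - i)).reverse).foldl
             (fun b j => max b (cntA gems value j)) 0) := by
    intro k
    induction k with
    | zero =>
      intro i hk hi
      have : i = gems.length := by omega
      subst this
      rw [show gems.length + 1 - gems.length = 1 by omega, List.range'_one, List.reverse_singleton]
      simp only [List.foldl_cons, List.foldl_nil]
      exact stepB_base gems value 0
    | succ k ih =>
      intro i hk hi
      have hlt : i < gems.length := by omega
      rw [show gems.length + 1 - i = (gems.length - i) + 1 by omega, List.range'_succ,
        List.reverse_cons, List.foldl_append, List.foldl_append]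
      have hih := ih (i + 1) (by omega) (by omega)
      rw [show gems.length + 1 - (i + 1) = gems.length - i by omega] at hih
      rw [hih]
      simp only [List.foldl_cons, List.foldl_nil]
      exact stepB_rec gems value i hlt _
  intro i hi
  exact main (gems.length - i) i rfl hi

theorem cntA_last (gems : List Int) (value : Int) : cntA gems value gems.length ≤ 0 := by
  unfold cntA
  rw [show gems.length + 1 - gems.length = 1 by omega, List.range'_one]
  rcases hf : [gems.length].find? (fun j => decide (Pf gems gems.length + value ≤ Pf gems j)) with _ | j
  · simp only []
    omega
  · have hj : j = gems.length := by
      have := List.find?_some hf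
      have hmem := List.mem_of_find?_eq_some hf
      simp at hmem
      exact hmem
    subst hj
    simp only []
    split_ifs <;> omega

theorem foldl_max_congr (g g' : Nat → Int) :
    ∀ (l : List Nat) (a : Int), (∀ x ∈ l, g x = g' x) →
      l.foldl (fun b j => max b (g j)) a = l.foldl (fun b j => max b (g' j)) a := by
  intro l
  induction l with
  | nil => intro a _; rfl
  | cons x l ih =>
    intro a h
    simp only [List.foldl_cons]
    rw [h x (by simp), ih _ (fun y hy => h y (by simp [hy]))]

theorem innerA_eq (gems : List Int) (value : Int) :
    ∀ i, i ≤ gems.length → ∀ tv tr : Int,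
    innerA gems value i tv tr =
      (match (List.range' i (gems.length + 1 - i)).find?
          (fun j => decide (value ≤ tv + (Pf gems j - Pf gems i))) with
      | some j => tr + ((j : Int) - i) - (if value < tv + (Pf gems j - Pf gems i) then 1 else 0)
      | none => tr + ((gems.length : Int) - i)) := by
  have main : ∀ k i, gems.length - i = k → i ≤ gems.length → ∀ tv tr : Int,
      innerA gems value i tv tr =
      (match (List.range' i (gems.length + 1 - i)).find?
          (fun j => decide (value ≤ tv + (Pf gems j - Pf gems i))) with
      | some j => tr + ((j : Int) - i) - (if value < tv + (Pf gems j - Pf gems i) then 1 else 0)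
      | none => tr + ((gems.length : Int) - i)) := by
    intro k
    induction k with
    | zero =>
      intro i hk hi tv tr
      have hie : i = gems.length := by omega
      subst hie
      have hr : gems.length + 1 - gems.length = 1 := by omega
      rw [hr]
      unfold innerA
      rw [dif_neg (by omega)]
      rw [List.range'_one]
      by_cases hv : value ≤ tv
      · rw [List.find?_cons_of_pos (by simp only [sub_self, add_zero, decide_eq_true_eq]; omega)]
        simp only []
        simp only [sub_self, add_zero]
        split_ifs <;> simp
      · rw [List.find?_cons_of_neg (by simp only [sub_self, add_zero, decide_eq_true_eq]; omega),
          List.find?_nil]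
        simp only []
        rw [if_neg (by omega)]
        simp
    | succ k ih =>
      intro i hk hi tv tr
      have hilt : i < gems.length := by omega
      have hr : gems.length + 1 - i = (gems.length - i) + 1 := by omega
      rw [hr, List.range'_succ]
      unfold innerA
      by_cases hv : tv < value
      · rw [dif_pos ⟨hv, hilt⟩]
        rw [List.find?_cons_of_neg (by simp only [sub_self, add_zero, decide_eq_true_eq]; omega)]
        have hfun : (fun j => decide (value ≤ (tv + gems[i]) + (Pf gems j - Pf gems (i + 1))))
            = (fun j => decide (value ≤ tv + (Pf gems j - Pf gems i))) := by
          funext j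
          rw [Pf_succ gems i hilt]
          simp only [decide_eq_decide]
          omega
        have hih := ih (i + 1) (by omega) (by omega) (tv + gems[i]) (tr + 1)
        rw [hfun] at hih
        have hr2 : gems.length + 1 - (i + 1) = gems.length - i := by omega
        rw [hr2] at hih
        rw [hih]
        rcases hfind : (List.range' (i+1) (gems.length - i)).find?
            (fun j => decide (value ≤ tv + (Pf gems j - Pf gems i))) with _ | j
        · simp only []; push_cast; ring
        · simp only []
          rw [Pf_succ gems i hilt]
          have hcond : (value < tv + gems[i] + (Pf gems j - (Pf gems i + gems[i])))
              ↔ (value < tv + (Pf gems j - Pf gems i)) := by constructor <;> (intro; omega)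
          by_cases hc : value < tv + (Pf gems j - Pf gems i)
          · rw [if_pos (hcond.mpr hc), if_pos hc]; push_cast; ring
          · rw [if_neg (fun hx => hc (hcond.mp hx)), if_neg hc]; push_cast; ring
      · rw [dif_neg (by omega)]
        rw [List.find?_cons_of_pos (by simp only [sub_self, add_zero, decide_eq_true_eq]; omega)]
        simp only []
        simp only [sub_self, add_zero]
        split_ifs <;> simp
  intro i hi tv tr
  exact main (gems.length - i) i rfl hi tv tr

theorem innerA_cntA (gems : List Int) (value : Int) (i : Nat) (hi : i ≤ gems.length) :
    innerA gems value i 0 0 = cntA gems value i := by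
  rw [innerA_eq gems value i hi 0 0]
  unfold cntA
  have hfun : (fun j => decide (value ≤ 0 + (Pf gems j - Pf gems i)))
      = (fun j => decide (Pf gems i + value ≤ Pf gems j)) := by
    funext j
    simp only [decide_eq_decide]
    omega
  rw [hfun]
  rcases hf : (List.range' i (gems.length + 1 - i)).find?
      (fun j => decide (Pf gems i + value ≤ Pf gems j)) with _ | j
  · simp only []
    ring
  · simp only []
    by_cases hc : Pf gems i + value < Pf gems j
    · rw [if_pos (by omega), if_pos hc]
      ring
    · rw [if_neg (by omega), if_neg hc]
      ring

theorem solution_eq_alt (n : Int) (gems : List Int) (value : Int) :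
    solution n gems value = solution_alt n gems value := by
  unfold solution solution_alt
  simp only []
  set m := gems.length with hm
  have hA : (List.range m).foldl (fun result i => max result (innerA gems value i 0 0)) 0
      = (List.range' 0 m).foldl (fun b j => max b (cntA gems value j)) 0 := by
    rw [List.range_eq_range']
    apply foldl_max_congr
    intro x hx
    have hxm : x ≤ m := by
      have := List.mem_range'_1.mp hx
      omega
    exact innerA_cntA gems value x hxm
  rw [hA]
  have hB := loopB gems value 0 (by omega)
  rw [show m + 1 - 0 = m + 1 from rfl] at hB
  rw [List.range_eq_range', hB]
  simp only []
  rw [foldl_max_reverse]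
  rw [show List.range' 0 (m + 1) = List.range' 0 m ++ [0 + m] from List.range'_1_concat]
  rw [List.foldl_append]
  simp only [List.foldl_cons, List.foldl_nil, Nat.zero_add]
  have h1 : cntA gems value m ≤ 0 := cntA_last gems value
  have h2 : (0 : Int) ≤ (List.range' 0 m).foldl (fun b j => max b (cntA gems value j)) 0 :=
    le_foldl_max _ _ 0
  omega

-- ===== VERDICT (by name: the statement is the Claim_ definition above) =====
theorem solution_spec : Claim_equal_solution := by
  intro n gems value _
  unfold Spec_solution
  exact solution_eq_alt n gems value
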